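-- pv_equiv track=rewrite | github.com/BrenoMartinsDeOliveiraVasconcelos/hfclib | hfclib.py | getVariables
-- ===== SOURCE A (Python) =====
-- def _section_exists(hfc_list: list[dict[dict]], section_name: str) -> bool:
--     for section in hfc_list:
--         if section_name in section.keys():
--             return True
--
--     return False
--
-- def getVariables(section_name: str, hfc_list: list[dict[dict]]) -> dict:
--     """
--     Get all variables from a specified section in a HFC list.
--
--     Parameters
--     ----------
--     section_name : str
--         The name of the section to get variables from.
--     hfc_list : list[dict[dict]]
--         The HFC list to be modified.
--
--     Returns
--     -------
--     dict
--         A dictionary with all variables from the specified section.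
--
--     Raises
--     ------
--     ValueError
--         If the section is not found in the HFC list.
--     """
--
--     list_get = hfc_list
--
--     # Look for section
--     if not _section_exists(list_get, section_name):
--         raise ValueError(f"Section {section_name} not found in HFC list")
--
--     for section in list_get:
--         if section_name in section.keys():
--             # Get variables
--             return section[section_name]
--
--     return []
-- ===== SOURCE B (Python) =====
-- def getVariables(section_name: str, hfc_list: list[dict[dict]]) -> dict:
--     for section in hfc_list:
--         variables = section.get(section_name)
--         if variables is not None:
--             return variables
--     raise ValueError(f"Section {section_name} not found in HFC list")
-- ===== Notes on version B (the rewrite author's own statement) =====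
-- stated objective: simpler
-- what changed: B replaces A's two-phase design (a _section_exists pre-scan followed by a second scan with a dead `return []`) with a single loop that returns the first section's .get() hit and raises the same ValueError after the loop.
import Mathlib
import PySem

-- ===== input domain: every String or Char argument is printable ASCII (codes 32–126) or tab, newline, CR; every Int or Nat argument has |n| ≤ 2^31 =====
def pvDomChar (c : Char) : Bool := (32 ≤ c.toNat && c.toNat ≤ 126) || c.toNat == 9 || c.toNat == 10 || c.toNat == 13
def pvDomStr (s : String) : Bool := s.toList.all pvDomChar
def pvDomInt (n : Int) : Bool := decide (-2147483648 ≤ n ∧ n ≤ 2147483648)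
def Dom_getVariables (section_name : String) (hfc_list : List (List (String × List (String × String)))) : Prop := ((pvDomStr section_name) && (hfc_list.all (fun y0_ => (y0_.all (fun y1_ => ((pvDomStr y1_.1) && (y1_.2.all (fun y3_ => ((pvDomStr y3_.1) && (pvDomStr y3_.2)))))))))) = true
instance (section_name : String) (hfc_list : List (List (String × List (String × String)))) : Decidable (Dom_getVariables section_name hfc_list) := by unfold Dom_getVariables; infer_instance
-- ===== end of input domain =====

-- B collapses A's _section_exists pre-scan + second scan (with dead `return []`) into one loop; same first-match value and same ValueError.


-- ===== PORT A =====
-- `section_name in section.keys()` (dict key membership, assoc list by convention)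
def pvInKeys (section_name : String) (sec : List (String × List (String × String))) : Bool :=
  sec.any (fun kv => kv.1 == section_name)

-- helper _section_exists: loop with early `return True`, then `return False`
def pvSectionExists (hfc_list : List (List (String × List (String × String)))) (section_name : String) : Bool :=
  match hfc_list with
  | [] => false
  | sec :: rest =>
      if pvInKeys section_name sec then true else pvSectionExists rest section_name

-- `section[section_name]` (dict lookup = first match per the convention)
def pvDictGet (section_name : String) (sec : List (String × List (String × String))) : List (String × String) :=
  ((sec.find? (fun kv => kv.1 == section_name)).map (·.2)).getD []

-- A's second loop, then the dead `return []`
def pvFindLoop (section_name : String) : List (List (String × List (String × String))) → List (String × String)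
  | [] => []
  | sec :: rest =>
      if pvInKeys section_name sec then pvDictGet section_name sec
      else pvFindLoop section_name rest

def getVariables (section_name : String) (hfc_list : List (List (String × List (String × String)))) : List (String × String) :=
  let list_get := hfc_list
  if !(pvSectionExists list_get section_name) then []   -- Python: raise ValueError (excluded by Pre_)
  else pvFindLoop section_name list_get

-- ===== PORT B =====
-- single loop: `section.get(section_name)`, return on a hit, raise after the loop
def getVariables_alt (section_name : String) (hfc_list : List (List (String × List (String × String)))) : List (String × String) :=
  match hfc_list with
  | [] => []   -- Python: raise ValueError (excluded by Pre_)
  | sec :: rest =>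
      match sec.find? (fun kv => kv.1 == section_name) with
      | some kv => kv.2
      | none => getVariables_alt section_name rest

-- ===== PRECONDITION & SPEC =====
-- Pre_ excludes exactly the inputs where no section contains section_name: there A (and B) raise ValueError.
def Pre_getVariables (section_name : String) (hfc_list : List (List (String × List (String × String)))) : Prop :=
  hfc_list.any (fun sec => sec.any (fun kv => kv.1 == section_name)) = true
instance (section_name : String) (hfc_list : List (List (String × List (String × String)))) : Decidable (Pre_getVariables section_name hfc_list) := by unfold Pre_getVariables; infer_instance

def pvWitness_getVariables : String × (List (List (String × List (String × String)))) :=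
  ("a", [[("b", [])], [("a", [("x", "1")]), ("c", [])]])

def Spec_getVariables (section_name : String) (hfc_list : List (List (String × List (String × String)))) (out : List (String × String)) : Prop := out = getVariables_alt section_name hfc_list
instance (section_name : String) (hfc_list : List (List (String × List (String × String)))) (out : List (String × String)) : Decidable (Spec_getVariables section_name hfc_list out) := by unfold Spec_getVariables; infer_instance

-- ===== CLAIM (what is proved, stated in full; the proofs are below) =====
def Claim_equal_getVariables : Prop := ∀ (section_name : String) (hfc_list : List (List (String × List (String × String)))), Dom_getVariables section_name hfc_list → Pre_getVariables section_name hfc_list → Spec_getVariables section_name hfc_list (getVariables section_name hfc_list)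

-- ===== LEMMAS AND PROOFS =====
lemma pvInKeys_eq_isSome (section_name : String) (sec : List (String × List (String × String))) :
    pvInKeys section_name sec = (sec.find? (fun kv => kv.1 == section_name)).isSome := by
  induction sec with
  | nil => rfl
  | cons kv rest ih =>
      by_cases h : kv.1 == section_name <;>
        simp [pvInKeys, List.any_cons, List.find?_cons, h, ← ih, pvInKeys]

-- A's second loop equals B's loop on EVERY input (both return [] when the key is nowhere).
lemma pvFindLoop_eq_alt (section_name : String) (hfc_list : List (List (String × List (String × String)))) :
    pvFindLoop section_name hfc_list = getVariables_alt section_name hfc_list := by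
  induction hfc_list with
  | nil => rfl
  | cons sec rest ih =>
      rw [pvFindLoop, getVariables_alt, pvInKeys_eq_isSome]
      cases h : sec.find? (fun kv => kv.1 == section_name) with
      | none => simp [h, ih]
      | some kv => simp [h, pvDictGet]

-- ===== VERDICT (by name: the statement is the Claim_ definition above) =====
theorem getVariables_spec : Claim_equal_getVariables := by
  intro section_name hfc_list _ hpre
  unfold Spec_getVariables getVariables
  have hex : pvSectionExists hfc_list section_name = true := by
    clear ‹Dom_getVariables section_name hfc_list›
    induction hfc_list with
    | nil => exact absurd hpre (by simp [Pre_getVariables])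
    | cons sec rest ih =>
        rw [pvSectionExists]
        by_cases h : pvInKeys section_name sec
        · simp [h]
        · simp only [h]
          refine ih ?_
          have h' : ¬ (sec.any (fun kv => kv.1 == section_name) = true) := by
            simpa [pvInKeys] using h
          simp [Pre_getVariables] at hpre h' ⊢
          tauto
  simp [hex, pvFindLoop_eq_alt]
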